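-- pv_equiv track=rewrite | github.com/cowboysmall-comp/hackerrank | src/strings/make_it_anagram.py | deletions
-- ===== SOURCE A (Python) =====
-- from collections import defaultdict
--
-- def deletions(string1, string2):
--     counter1  = defaultdict(int)
--     counter2  = defaultdict(int)
--
--     for c in string1:
--         counter1[c] += 1
--
--     for c in string2:
--         counter2[c] += 1
--
--     return sum(abs(counter1[c] - counter2[c]) for c in (set([c for c in string1]) | set([c for c in string2])))
-- ===== SOURCE B (Python) =====
-- def deletions(string1, string2):
--     s1 = sorted(string1)
--     s2 = sorted(string2)
--     i = j = common = 0
--     while i < len(s1) and j < len(s2):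
--         if s1[i] == s2[j]:
--             common += 1
--             i += 1
--             j += 1
--         elif s1[i] < s2[j]:
--             i += 1
--         else:
--             j += 1
--     return len(string1) + len(string2) - 2 * common
-- ===== Notes on version B (the rewrite author's own statement) =====
-- stated objective: alternative
-- what changed: B sorts both strings and counts the multiset overlap with a two-pointer merge over the sorted lists, returning len1+len2-2*overlap, instead of building frequency dicts and summing per-character absolute count differences over the union of character sets.
import Mathlib
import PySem

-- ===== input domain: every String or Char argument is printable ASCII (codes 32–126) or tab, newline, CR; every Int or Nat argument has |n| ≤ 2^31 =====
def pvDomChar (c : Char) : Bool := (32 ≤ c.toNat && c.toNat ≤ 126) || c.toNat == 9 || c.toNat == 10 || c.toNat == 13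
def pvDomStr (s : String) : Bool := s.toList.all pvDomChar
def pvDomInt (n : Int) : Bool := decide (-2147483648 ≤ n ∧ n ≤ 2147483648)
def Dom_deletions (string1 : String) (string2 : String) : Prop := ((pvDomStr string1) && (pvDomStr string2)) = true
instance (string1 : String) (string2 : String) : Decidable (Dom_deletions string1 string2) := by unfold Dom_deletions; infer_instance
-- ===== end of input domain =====

-- B sorts both strings and counts the multiset overlap with a two-pointer merge,
-- returning len1 + len2 - 2*overlap, instead of A's abs-difference sum over frequency dicts.

-- ===== PORT A =====
def deletions (string1 : String) (string2 : String) : Int :=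
  let counter1 : PySem.Dict Char Int :=
    string1.toList.foldl (fun d c => d.modify c 0 (· + 1)) PySem.Dict.empty
  let counter2 : PySem.Dict Char Int :=
    string2.toList.foldl (fun d c => d.modify c 0 (· + 1)) PySem.Dict.empty
  ((PySem.Set.union (PySem.Set.ofList string1.toList) (PySem.Set.ofList string2.toList)).map
    (fun c => |counter1.getD c 0 - counter2.getD c 0|)).sum

-- ===== PORT B =====
-- the while loop over indices i, j, consuming the two sorted lists, as a recursion on the suffixes
def pvMerge : List Char → List Char → Int
  | [], _ => 0
  | _ :: _, [] => 0
  | x :: xs, y :: ys =>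
    if x = y then 1 + pvMerge xs ys
    else if x < y then pvMerge xs (y :: ys)
    else pvMerge (x :: xs) ys
termination_by l1 l2 => l1.length + l2.length

def deletions_alt (string1 : String) (string2 : String) : Int :=
  let s1 := PySem.List.sorted string1.toList (fun c => c) false
  let s2 := PySem.List.sorted string2.toList (fun c => c) false
  let common := pvMerge s1 s2
  (PySem.Str.len string1 : Int) + (PySem.Str.len string2 : Int) - 2 * common

-- ===== PRECONDITION & SPEC =====
def Spec_deletions (string1 : String) (string2 : String) (out : Int) : Prop := out = deletions_alt string1 string2
instance (string1 : String) (string2 : String) (out : Int) : Decidable (Spec_deletions string1 string2 out) := by unfold Spec_deletions; infer_instance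

-- ===== CLAIM (what is proved, stated in full; the proofs are below) =====
def Claim_equal_deletions : Prop := ∀ (string1 : String) (string2 : String), Dom_deletions string1 string2 → Spec_deletions string1 string2 (deletions string1 string2)

-- ===== LEMMAS AND PROOFS =====

-- sum of counts of a multiset m over any nodup list containing its support is its card
theorem pv_sum_count_multiset (u : List Char) (m : Multiset Char) (hu : u.Nodup)
    (hsub : ∀ c ∈ m, c ∈ u) :
    (u.map (fun c => (m.count c : Int))).sum = (m.card : Int) := by
  have key : (u.map (fun c => m.count c)).sum = m.card := by
    have h1 : (u.map (fun c => m.count c)).sum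
        = ∑ c ∈ u.toFinset, m.count c := (List.sum_toFinset _ hu).symm
    rw [h1]
    rw [← Finset.sum_subset (s₁ := m.toFinset) (s₂ := u.toFinset)
      (fun c hc => List.mem_toFinset.2 (hsub c (Multiset.mem_toFinset.1 hc)))
      (fun c _ hnc => Multiset.count_eq_zero_of_notMem (fun h => hnc (Multiset.mem_toFinset.2 h)))]
    exact Multiset.toFinset_sum_count_eq m
  calc (u.map (fun c => (m.count c : Int))).sum
      = (((u.map (fun c => m.count c)).sum : Nat) : Int) := by
        clear key hsub
        induction u with
        | nil => simp
        | cons x t ih => simp [ih (List.Nodup.of_cons hu)]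
    _ = (m.card : Int) := by rw [key]

-- the two-pointer merge over two ≤-sorted lists computes the multiset-intersection size
theorem pvMerge_eq : ∀ (l1 l2 : List Char), l1.Pairwise (· ≤ ·) → l2.Pairwise (· ≤ ·) →
    pvMerge l1 l2 = (((l1 : Multiset Char) ∩ (l2 : Multiset Char)).card : Int) := by
  intro l1
  induction l1 with
  | nil => intro l2 _ _; simp [pvMerge]
  | cons x xs ih =>
    intro l2
    induction l2 with
    | nil => intro _ _; simp [pvMerge]
    | cons y ys ih2 =>
      intro hx hy
      have hx' := (List.pairwise_cons.1 hx).2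
      have hy' := (List.pairwise_cons.1 hy).2
      by_cases hxy : x = y
      · subst hxy
        have hmem : x ∈ (x ::ₘ (ys : Multiset Char)) := Multiset.mem_cons_self x _
        rw [pvMerge]
        have : ((x :: xs : List Char) : Multiset Char) ∩ ((x :: ys : List Char) : Multiset Char)
            = x ::ₘ ((xs : Multiset Char) ∩ (ys : Multiset Char)) := by
          rw [← Multiset.cons_coe x xs, ← Multiset.cons_coe x ys,
            Multiset.cons_inter_of_pos _ hmem, Multiset.erase_cons_head]
        rw [this, Multiset.card_cons, ih ys hx' hy']
        simp only [if_pos trivial]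
        push_cast; ring
      · by_cases hlt : x < y
        · have hnot : x ∉ ((y :: ys : List Char) : Multiset Char) := by
            rw [Multiset.mem_coe, List.mem_cons]
            rintro (rfl | hmem)
            · exact hxy rfl
            · exact absurd ((List.pairwise_cons.1 hy).1 x hmem) (not_le.2 hlt)
          rw [pvMerge]
          simp only [if_neg hxy, if_pos hlt]
          rw [← Multiset.cons_coe x xs, Multiset.cons_inter_of_neg _ hnot]
          exact ih (y :: ys) hx' hy
        · have hgt : y < x := lt_of_le_of_ne (not_lt.1 hlt) (fun h => hxy h.symm)
          have hnot : y ∉ ((x :: xs : List Char) : Multiset Char) := by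
            rw [Multiset.mem_coe, List.mem_cons]
            rintro (rfl | hmem)
            · exact hxy rfl
            · exact absurd ((List.pairwise_cons.1 hx).1 y hmem) (not_le.2 hgt)
          rw [pvMerge]
          simp only [if_neg hxy, if_neg hlt]
          rw [Multiset.inter_comm, ← Multiset.cons_coe y ys,
            Multiset.cons_inter_of_neg _ hnot, Multiset.inter_comm]
          exact ih2 hx hy'

theorem deletions_spec : Claim_equal_deletions := by
  intro s1 s2 _
  unfold Spec_deletions deletions deletions_alt
  simp only [PySem.Dict.getD_foldl_modify_add_one, PySem.Dict.getD_empty,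
    PySem.Str.len_eq, zero_add]
  set l1 := s1.toList
  set l2 := s2.toList
  set u := PySem.Set.union (PySem.Set.ofList l1) (PySem.Set.ofList l2) with hu_def
  have hu : u.Nodup := PySem.Set.nodup_union _ _ (PySem.Set.nodup_ofList l1)
  have hmemu : ∀ c, c ∈ u ↔ (c ∈ l1 ∨ c ∈ l2) := by
    intro c
    rw [hu_def, PySem.Set.mem_union, PySem.Set.mem_ofList, PySem.Set.mem_ofList]
  -- pointwise identity |a - b| = a + b - 2 * min a b for nonnegative a, b
  have hpt : ∀ c : Char, |((l1.count c : Int)) - ((l2.count c : Int))|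
      = (l1.count c : Int) + (l2.count c : Int)
        - 2 * min ((l1.count c : Int)) ((l2.count c : Int)) := by
    intro c
    rcases abs_cases (((l1.count c : Int)) - ((l2.count c : Int))) with ⟨h1, h2⟩ | ⟨h1, h2⟩ <;> omega
  have hA : (u.map (fun c => |((l1.count c : Int)) - ((l2.count c : Int))|)).sum
      = (u.map (fun c => (l1.count c : Int))).sum + (u.map (fun c => (l2.count c : Int))).sum
        - 2 * (u.map (fun c => min ((l1.count c : Int)) ((l2.count c : Int)))).sum := by
    clear hu hmemu hu_def
    induction u with
    | nil => simp
    | cons x t ih =>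
      simp only [List.map_cons, List.sum_cons, ih, hpt x]; ring
  rw [hA]
  have h1 : (u.map (fun c => (l1.count c : Int))).sum = (l1.length : Int) := by
    rw [show (l1.length : Int) = (((l1 : Multiset Char)).card : Int) by simp]
    have := pv_sum_count_multiset u (l1 : Multiset Char) hu
      (fun c hc => (hmemu c).2 (Or.inl (Multiset.mem_coe.1 hc)))
    simpa using this
  have h2 : (u.map (fun c => (l2.count c : Int))).sum = (l2.length : Int) := by
    rw [show (l2.length : Int) = (((l2 : Multiset Char)).card : Int) by simp]
    have := pv_sum_count_multiset u (l2 : Multiset Char) hu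
      (fun c hc => (hmemu c).2 (Or.inr (Multiset.mem_coe.1 hc)))
    simpa using this
  -- the min-sum over the union equals the multiset-intersection size
  have h3 : (u.map (fun c => min ((l1.count c : Int)) ((l2.count c : Int)))).sum
      = ((((l1 : Multiset Char) ∩ (l2 : Multiset Char)).card : Int)) := by
    have hcnt : ∀ c : Char, min ((l1.count c : Int)) ((l2.count c : Int))
        = ((((l1 : Multiset Char) ∩ (l2 : Multiset Char)).count c : Int)) := by
      intro c
      rw [Multiset.count_inter]
      simp [Nat.cast_min]
    simp only [hcnt]
    exact pv_sum_count_multiset u _ hu (fun c hc =>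
      (hmemu c).2 (Or.inl (Multiset.mem_coe.1 (Multiset.mem_of_le
        Multiset.inter_le_left hc))))
  rw [h1, h2, h3]
  -- the B side: the merge counts the same intersection size, since sorting permutes
  have hperm1 : ((PySem.List.sorted l1 (fun c => c) false : List Char) : Multiset Char)
      = (l1 : Multiset Char) := Multiset.coe_eq_coe.2 (PySem.List.sorted_perm l1 _ false)
  have hperm2 : ((PySem.List.sorted l2 (fun c => c) false : List Char) : Multiset Char)
      = (l2 : Multiset Char) := Multiset.coe_eq_coe.2 (PySem.List.sorted_perm l2 _ false)
  rw [pvMerge_eq _ _ (PySem.List.sorted_pairwise l1 (fun c => c))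
    (PySem.List.sorted_pairwise l2 (fun c => c)), hperm1, hperm2]
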